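-- pv_equiv track=rewrite | github.com/KaytchJam/UT-Email-Web-Scraper | takeout_code/NETStringTools.py | extractUsingReplyTo
-- ===== SOURCE A (Python) =====
-- def extractUsingReplyTo(mbox_string):
--     if not isinstance(mbox_string, str) or mbox_string == None:
--         raise TypeError("mbox_string must be a string")
--
--     # CONSTANTS
--     REPLY_TO = "Reply-To: "
--     STR_END = len(mbox_string)
--     EMAIL_INDICATOR = "<>"
--     IGNORE = ["\"", "\\"]
--
--     # POINTERS (INDICES)
--     stream_ptr = mbox_string.find(REPLY_TO)
--     indicator_ptr = 0
--     data_index = 0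
--
--     if stream_ptr == -1: return None
--     stream_ptr += len(REPLY_TO)
--
--     data = [[]]
--     while stream_ptr < STR_END and indicator_ptr < len(EMAIL_INDICATOR):
--         cur_char = mbox_string[stream_ptr]
--         if cur_char == EMAIL_INDICATOR[indicator_ptr]:
--             indicator_ptr += 1
--         else:
--             if cur_char == ' ':
--                 data_index += 1
--                 data.append([])
--             elif cur_char not in IGNORE:
--                 data[data_index].append(cur_char)
--         stream_ptr += 1
--
--     return data
-- ===== SOURCE B (Python) =====
-- def extractUsingReplyTo(mbox_string):
--     if not isinstance(mbox_string, str) or mbox_string == None: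
--         raise TypeError("mbox_string must be a string")
--     i = mbox_string.find("Reply-To: ")
--     if i == -1:
--         return None
--     rest = mbox_string[i + len("Reply-To: "):]
--     lt = rest.find('<')
--     if lt == -1:
--         segment = rest
--     else:
--         gt = rest.find('>', lt + 1)
--         segment = rest[:lt] + (rest[lt + 1:] if gt == -1 else rest[lt + 1:gt])
--     segment = segment.replace('"', '').replace('\\', '')
--     return [list(tok) for tok in segment.split(' ')]
-- ===== Notes on version B (the rewrite author's own statement) =====
-- stated objective: simpler
-- what changed: A's single-pass character state machine (an indicator pointer walking the bracket pair plus a mutable bucket index) is replaced by locating the bracketed segment with two str.find calls, slicing it out, and using the library replace and split methods to clean and tokenize it.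
import Mathlib
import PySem

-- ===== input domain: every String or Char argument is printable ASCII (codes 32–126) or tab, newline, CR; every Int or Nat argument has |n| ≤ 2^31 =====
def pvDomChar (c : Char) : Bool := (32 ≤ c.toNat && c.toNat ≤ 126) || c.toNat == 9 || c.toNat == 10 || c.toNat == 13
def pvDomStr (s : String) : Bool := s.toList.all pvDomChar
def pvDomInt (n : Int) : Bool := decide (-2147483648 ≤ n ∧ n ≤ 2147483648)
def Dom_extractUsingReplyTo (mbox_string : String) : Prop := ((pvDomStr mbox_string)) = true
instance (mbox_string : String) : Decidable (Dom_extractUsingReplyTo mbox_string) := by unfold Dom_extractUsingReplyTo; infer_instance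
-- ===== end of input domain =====

-- B replaces A's char-by-char state machine (indicator pointer, data index) by find/slice
-- decomposition of the segment plus library replace/split; objective: simpler. Equivalence
-- proved on all strings (A's TypeError guard never fires for a genuine str).

-- ===== PORT A =====
-- data[data_index].append(cur_char): data_index always points at the last bucket
def pvAppendLast (data : List (List String)) (s : String) : List (List String) :=
  match data with
  | [] => [[s]]
  | [d] => [d ++ [s]]
  | d :: rest => d :: pvAppendLast rest s

-- the while loop: one step per character, indicator_ptr ∈ {0,1,2}
def pvLoopA (cs : List Char) (ip : Nat) (data : List (List String)) : List (List String) :=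
  match cs with
  | [] => data
  | c :: rest =>
    if ip < 2 then
      if c = (if ip = 0 then '<' else '>') then pvLoopA rest (ip + 1) data
      else if c = ' ' then pvLoopA rest ip (data ++ [[]])
      else if c = '"' ∨ c = '\\' then pvLoopA rest ip data
      else pvLoopA rest ip (pvAppendLast data (String.mk [c]))
    else data

def extractUsingReplyTo (mbox_string : String) : Option (List (List String)) :=
  let streamPtr := PySem.Str.find mbox_string "Reply-To: "
  if streamPtr = -1 then none
  else
    let streamPtr := streamPtr + 10
    some (pvLoopA (mbox_string.toList.drop streamPtr.toNat) 0 [[]])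

-- ===== PORT B =====
def extractUsingReplyTo_alt (mbox_string : String) : Option (List (List String)) :=
  let i := PySem.Str.find mbox_string "Reply-To: "
  if i = -1 then none
  else
    let rest := PySem.List.slice mbox_string.toList (some (i + 10)) none
    let lt := PySem.Chars.find rest ['<']
    let segment :=
      if lt = -1 then rest
      else
        let gt := PySem.Chars.findFrom rest ['>'] (lt + 1) none
        PySem.Chars.slice rest none (some lt) ++
          (if gt = -1 then PySem.Chars.slice rest (some (lt + 1)) none
           else PySem.Chars.slice rest (some (lt + 1)) (some gt))
    let segment := PySem.Chars.replace (PySem.Chars.replace segment ['"'] []) ['\\'] []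
    some ((PySem.Chars.splitOn segment [' ']).map (fun tok => tok.map (fun c => String.mk [c])))

-- ===== PRECONDITION & SPEC =====
def Spec_extractUsingReplyTo (mbox_string : String) (out : Option (List (List String))) : Prop := out = extractUsingReplyTo_alt mbox_string
instance (mbox_string : String) (out : Option (List (List String))) : Decidable (Spec_extractUsingReplyTo mbox_string out) := by unfold Spec_extractUsingReplyTo; infer_instance

-- ===== CLAIM (what is proved, stated in full; the proofs are below) =====
def Claim_equal_extractUsingReplyTo : Prop := ∀ (mbox_string : String), Dom_extractUsingReplyTo mbox_string → Spec_extractUsingReplyTo mbox_string (extractUsingReplyTo mbox_string)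

-- ===== LEMMAS AND PROOFS =====

-- pure per-character processing (what the loop does while no indicator char interferes)
def pvProc (cs : List Char) (d : List (List String)) : List (List String) :=
  match cs with
  | [] => d
  | c :: rest =>
    if c = ' ' then pvProc rest (d ++ [[]])
    else if c = '"' ∨ c = '\\' then pvProc rest d
    else pvProc rest (pvAppendLast d (String.mk [c]))

-- spec-level: split on spaces, dropping '"' and '\'
def pvSS (cs : List Char) : List (List String) :=
  match cs with
  | [] => [[]]
  | c :: rest =>
    if c = ' ' then [] :: pvSS rest
    else if c = '"' ∨ c = '\\' then pvSS rest
    else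
      match pvSS rest with
      | [] => [[String.mk [c]]]
      | p :: ps => (String.mk [c] :: p) :: ps

-- split-on-space of a raw char list
def pvSplitSp (cs : List Char) : List (List Char) :=
  match cs with
  | [] => [[]]
  | c :: rest =>
    if c = ' ' then [] :: pvSplitSp rest
    else
      match pvSplitSp rest with
      | [] => [[c]]
      | p :: ps => (c :: p) :: ps

lemma pvSS_ne_nil (cs : List Char) : pvSS cs ≠ [] := by
  induction cs with
  | nil => simp [pvSS]
  | cons c rest ih =>
    simp only [pvSS]
    split_ifs with h1 h2
    · simp
    · exact ih
    · cases h : pvSS rest <;> simp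

lemma pvSplitSp_ne_nil (cs : List Char) : pvSplitSp cs ≠ [] := by
  induction cs with
  | nil => simp [pvSplitSp]
  | cons c rest ih =>
    simp only [pvSplitSp]
    split_ifs with h1
    · simp
    · cases h : pvSplitSp rest <;> simp

lemma pvAppendLast_append (ds : List (List String)) (d : List String) (s : String) :
    pvAppendLast (ds ++ [d]) s = ds ++ [d ++ [s]] := by
  induction ds with
  | nil => simp [pvAppendLast]
  | cons x xs ih =>
    cases xs with
    | nil => simp [pvAppendLast]
    | cons y ys => simpa [pvAppendLast] using ih

def pvMergeHead (d : List String) (ts : List (List String)) : List (List String) :=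
  match ts with
  | [] => [d]
  | p :: ps => (d ++ p) :: ps

lemma pvProc_eq (cs : List Char) : ∀ (ds : List (List String)) (d : List String),
    pvProc cs (ds ++ [d]) = ds ++ pvMergeHead d (pvSS cs) := by
  induction cs with
  | nil => intro ds d; simp [pvProc, pvSS, pvMergeHead]
  | cons c rest ih =>
    intro ds d
    obtain ⟨p, ps, hp⟩ : ∃ p ps, pvSS rest = p :: ps := by
      cases h' : pvSS rest with
      | nil => exact absurd h' (pvSS_ne_nil rest)
      | cons p ps => exact ⟨p, ps, rfl⟩
    simp only [pvProc, pvSS]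
    split_ifs with h1 h2
    · have := ih (ds ++ [d]) []
      rw [show ds ++ [d] ++ [([] : List String)] = ds ++ [d] ++ [[]] from rfl] at this
      rw [List.append_assoc] at this ⊢
      rw [this]
      simp [pvMergeHead, hp]
    · exact ih ds d
    · rw [pvAppendLast_append, ih ds (d ++ [String.mk [c]])]
      simp [pvMergeHead, hp]

lemma pvProc_nil_acc (cs : List Char) : pvProc cs [[]] = pvSS cs := by
  have h := pvProc_eq cs [] []
  obtain ⟨p, ps, hp⟩ : ∃ p ps, pvSS cs = p :: ps := by
    cases h' : pvSS cs with
    | nil => exact absurd h' (pvSS_ne_nil cs)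
    | cons p ps => exact ⟨p, ps, rfl⟩
  simpa [pvMergeHead, hp] using h

lemma pvProc_append (xs ys : List Char) (d : List (List String)) :
    pvProc (xs ++ ys) d = pvProc ys (pvProc xs d) := by
  induction xs generalizing d with
  | nil => rfl
  | cons c rest ih => simp only [List.cons_append, pvProc]; split_ifs <;> apply ih

lemma pvLoopA_two (cs : List Char) (d : List (List String)) : pvLoopA cs 2 d = d := by
  cases cs <;> simp [pvLoopA]

lemma pvLoopA_zero_no_lt (cs : List Char) (h : '<' ∉ cs) (d : List (List String)) :
    pvLoopA cs 0 d = pvProc cs d := by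
  induction cs generalizing d with
  | nil => rfl
  | cons c rest ih =>
    simp only [List.mem_cons, not_or] at h
    simp only [pvLoopA, pvProc]
    rw [if_pos (by norm_num), if_neg (by simp; exact fun e => h.1 e.symm)]
    split_ifs <;> exact ih h.2 _

lemma pvLoopA_one_no_gt (cs : List Char) (h : '>' ∉ cs) (d : List (List String)) :
    pvLoopA cs 1 d = pvProc cs d := by
  induction cs generalizing d with
  | nil => rfl
  | cons c rest ih =>
    simp only [List.mem_cons, not_or] at h
    simp only [pvLoopA, pvProc]
    rw [if_pos (by norm_num), if_neg (by simp; exact fun e => h.1 e.symm)]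
    split_ifs <;> exact ih h.2 _

lemma pvLoopA_zero_split (pre suf : List Char) (h : '<' ∉ pre) (d : List (List String)) :
    pvLoopA (pre ++ '<' :: suf) 0 d = pvLoopA suf 1 (pvProc pre d) := by
  induction pre generalizing d with
  | nil => simp [pvLoopA, pvProc]
  | cons c rest ih =>
    simp only [List.mem_cons, not_or] at h
    simp only [List.cons_append, pvLoopA, pvProc]
    rw [if_pos (by norm_num), if_neg (by simp; exact fun e => h.1 e.symm)]
    split_ifs <;> exact ih h.2 _

lemma pvLoopA_one_split (mid tail : List Char) (h : '>' ∉ mid) (d : List (List String)) :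
    pvLoopA (mid ++ '>' :: tail) 1 d = pvProc mid d := by
  induction mid generalizing d with
  | nil => simp [pvLoopA, pvLoopA_two, pvProc]
  | cons c rest ih =>
    simp only [List.mem_cons, not_or] at h
    simp only [List.cons_append, pvLoopA, pvProc]
    rw [if_pos (by norm_num), if_neg (by simp; exact fun e => h.1 e.symm)]
    split_ifs <;> exact ih h.2 _

-- replace (single old char, empty new) = filter
lemma pvReplaceGo (q : Char) (l : List Char) : ∀ (fuel : Nat) (acc : List Char),
    l.length ≤ fuel →
    PySem.Chars.replace.go [q] [] fuel l acc = acc.reverse ++ l.filter (fun c => c ≠ q) := by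
  induction l with
  | nil =>
    intro fuel acc _
    cases fuel <;> simp [PySem.Chars.replace.go]
  | cons c t ih =>
    intro fuel acc hf
    cases fuel with
    | zero => simp at hf
    | succ f =>
      simp only [PySem.Chars.replace.go, List.isPrefixOf, List.filter]
      by_cases hq : q = c
      · subst hq
        simp only [BEq.rfl, Bool.true_and, if_pos]
        rw [show ([] : List Char).reverse ++ acc = acc from by simp,
          show List.drop [q].length (q :: t) = t from rfl, ih f acc (by simpa using hf)]
        simp
      · rw [if_neg (by simp [hq]), ih f (c :: acc) (by simpa using hf)]
        have hcq : (c = q) = False := by simp; exact fun e => hq e.symm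
        simp [hcq]

lemma pvReplace_filter (q : Char) (cs : List Char) :
    PySem.Chars.replace cs [q] [] = cs.filter (fun c => c ≠ q) := by
  rw [show PySem.Chars.replace cs [q] [] = PySem.Chars.replace.go [q] [] cs.length cs [] from rfl,
    pvReplaceGo q cs cs.length [] le_rfl]
  simp

-- splitOn with a single space separator
lemma pvSplitGo (l : List Char) : ∀ (fuel : Nat) (cur : List Char) (acc : List (List Char)),
    l.length + 1 ≤ fuel →
    PySem.Chars.splitOn.go [' '] fuel l cur acc =
      acc.reverse ++
        (match pvSplitSp l with
         | [] => [cur.reverse]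
         | p :: ps => (cur.reverse ++ p) :: ps) := by
  induction l with
  | nil =>
    intro fuel cur acc hf
    cases fuel with
    | zero => simp at hf
    | succ f => simp [PySem.Chars.splitOn.go, pvSplitSp]
  | cons c t ih =>
    intro fuel cur acc hf
    obtain ⟨p, ps, hp⟩ : ∃ p ps, pvSplitSp t = p :: ps := by
      cases h' : pvSplitSp t with
      | nil => exact absurd h' (pvSplitSp_ne_nil t)
      | cons p ps => exact ⟨p, ps, rfl⟩
    cases fuel with
    | zero => simp at hf
    | succ f =>
      simp only [PySem.Chars.splitOn.go]
      by_cases hsp : c = ' '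
      · subst hsp
        rw [if_pos (by simp [List.isPrefixOf]),
          show List.drop [' '].length (' ' :: t) = t from rfl,
          ih f [] (cur.reverse :: acc) (by simpa using hf)]
        simp [pvSplitSp, hp]
      · rw [if_neg (by simp [List.isPrefixOf]; exact fun e => hsp e.symm),
          ih f (c :: cur) acc (by simpa using hf)]
        simp [pvSplitSp, hsp, hp]

lemma pvSplitOn_eq (cs : List Char) : PySem.Chars.splitOn cs [' '] = pvSplitSp cs := by
  rw [show PySem.Chars.splitOn cs [' '] = PySem.Chars.splitOn.go [' '] (cs.length + 1) cs [] [] from rfl,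
    pvSplitGo cs (cs.length + 1) [] [] le_rfl]
  obtain ⟨p, ps, hp⟩ : ∃ p ps, pvSplitSp cs = p :: ps := by
    cases h' : pvSplitSp cs with
    | nil => exact absurd h' (pvSplitSp_ne_nil cs)
    | cons p ps => exact ⟨p, ps, rfl⟩
  simp [hp]

lemma pvSS_eq_pipeline (cs : List Char) :
    (pvSplitSp ((cs.filter (fun c => c ≠ '"')).filter (fun c => c ≠ '\\'))).map
      (fun tok => tok.map (fun c => String.mk [c])) = pvSS cs := by
  induction cs with
  | nil => simp [pvSplitSp, pvSS]
  | cons c rest ih =>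
    simp only [pvSS]
    split_ifs with h1 h2
    · subst h1
      rw [show ((' ' :: rest).filter (fun c => c ≠ '"')) = ' ' :: rest.filter (fun c => c ≠ '"') from by
          simp [List.filter_cons],
        show ((' ' :: rest.filter (fun c => c ≠ '"')).filter (fun c => c ≠ '\\')) =
          ' ' :: (rest.filter (fun c => c ≠ '"')).filter (fun c => c ≠ '\\') from by
          simp [List.filter_cons]]
      simp only [pvSplitSp]
      rw [if_pos trivial]
      simp only [List.map_cons, List.map_nil]
      rw [ih]
    · rcases h2 with h2 | h2 <;> subst h2 <;>
        · simp only [List.filter_cons]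
          simp only [ne_eq, decide_not, List.filter_cons]
          simpa using ih
    · push_neg at h2
      rw [show ((c :: rest).filter (fun x => x ≠ '"')) = c :: rest.filter (fun x => x ≠ '"') from by
          simp [h2.1],
        show ((c :: rest.filter (fun x => x ≠ '"')).filter (fun x => x ≠ '\\')) =
          c :: (rest.filter (fun x => x ≠ '"')).filter (fun x => x ≠ '\\') from by
          simp [h2.2]]
      obtain ⟨p, ps, hp⟩ : ∃ p ps,
          pvSplitSp ((rest.filter (fun c => c ≠ '"')).filter (fun c => c ≠ '\\')) = p :: ps := by
        cases h' : pvSplitSp ((rest.filter (fun c => c ≠ '"')).filter (fun c => c ≠ '\\')) with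
        | nil => exact absurd h' (pvSplitSp_ne_nil _)
        | cons p ps => exact ⟨p, ps, rfl⟩
      rw [hp] at ih
      simp only [pvSplitSp, if_neg h1, hp, List.map_cons] at *
      rw [← ih]

-- find of a single char: not found ↔ not a member
lemma pvFind_neg (s : List Char) (c : Char) (h : PySem.Chars.find s [c] = -1) : c ∉ s := by
  intro hm
  exact (PySem.Chars.find_eq_neg_one_iff s [c]).mp h
    (by
      obtain ⟨l, r, rfl⟩ := List.append_of_mem hm
      exact ⟨l, r, by simp⟩)

-- find of a single char, found: canonical decomposition
lemma pvFind_pos (s : List Char) (c : Char) (h : PySem.Chars.find s [c] ≠ -1) :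
    ∃ n : Nat, PySem.Chars.find s [c] = (n : Int) ∧ n < s.length ∧
      s.take n ++ c :: s.drop (n + 1) = s ∧ c ∉ s.take n := by
  have h0 : 0 ≤ PySem.Chars.find s [c] := by
    have := PySem.Chars.neg_one_le_find s [c]
    omega
  obtain ⟨hpre, hmin⟩ := PySem.Chars.find_spec (s := s) (sub := [c]) h0
  set n := (PySem.Chars.find s [c]).toNat with hn
  have hlt : n < s.length := by
    by_contra hge
    push_neg at hge
    rw [List.drop_eq_nil_of_le hge] at hpre
    simp at hpre
  have hval : s[n] = c := by
    rw [List.drop_eq_getElem_cons hlt] at hpre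
    rcases List.prefix_cons_iff.mp hpre with h' | ⟨t, h', _⟩
    · simp at h'
    · injection h' with h1 _
      exact h1.symm
  refine ⟨n, by omega, hlt, ?_, ?_⟩
  · have hdrop : s.drop n = c :: s.drop (n + 1) := by
      rw [List.drop_eq_getElem_cons hlt, hval]
    calc s.take n ++ c :: s.drop (n + 1) = s.take n ++ s.drop n := by rw [hdrop]
    _ = s := List.take_append_drop n s
  · intro hm
    obtain ⟨j, hj, hjval⟩ := List.mem_iff_getElem.mp hm
    have hjn : j < n := lt_of_lt_of_le hj (by simp)
    have hjlen : j < s.length := lt_of_lt_of_le hjn (le_of_lt hlt)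
    apply hmin j hjn
    rw [List.drop_eq_getElem_cons hjlen]
    have hsj : s[j] = c := by
      rw [← hjval]
      exact (List.getElem_take).symm
    rw [hsj]
    simp

-- the heart: loop A equals B's find/slice/replace/split pipeline, for any suffix
lemma pvMain (rest : List Char) :
    pvLoopA rest 0 [[]] =
      (PySem.Chars.splitOn
        (PySem.Chars.replace (PySem.Chars.replace
          (if PySem.Chars.find rest ['<'] = -1 then rest
           else
             PySem.Chars.slice rest none (some (PySem.Chars.find rest ['<'])) ++
               (if PySem.Chars.findFrom rest ['>'] (PySem.Chars.find rest ['<'] + 1) none = -1 then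
                  PySem.Chars.slice rest (some (PySem.Chars.find rest ['<'] + 1)) none
                else
                  PySem.Chars.slice rest (some (PySem.Chars.find rest ['<'] + 1))
                    (some (PySem.Chars.findFrom rest ['>'] (PySem.Chars.find rest ['<'] + 1) none))))
          ['"'] []) ['\\'] []) [' ']).map (fun tok => tok.map (fun c => String.mk [c])) := by
  have pipe : ∀ cs : List Char,
      (PySem.Chars.splitOn (PySem.Chars.replace (PySem.Chars.replace cs ['"'] []) ['\\'] []) [' ']).map
        (fun tok => tok.map (fun c => String.mk [c])) = pvSS cs := by
    intro cs
    rw [pvReplace_filter, pvReplace_filter, pvSplitOn_eq, pvSS_eq_pipeline]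
  by_cases hlt : PySem.Chars.find rest ['<'] = -1
  · rw [if_pos hlt, pipe, pvLoopA_zero_no_lt rest (pvFind_neg rest '<' hlt), pvProc_nil_acc]
  · obtain ⟨n, hfind, hlen, hdec, hpre⟩ := pvFind_pos rest '<' hlt
    rw [if_neg hlt, hfind]
    have hcast : (n : Int) + 1 = ((n + 1 : Nat) : Int) := by push_cast; ring
    have hk : n + 1 ≤ rest.length := hlen
    rw [hcast, PySem.Chars.findFrom_natCast rest ['>'] (n + 1) hk]
    have hslice0 : PySem.Chars.slice rest none (some (n : Int)) = rest.take n := by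
      simp [PySem.Chars.slice_eq_listSlice, PySem.List.slice_to_natCast]
    by_cases hgt : PySem.Chars.find (rest.drop (n + 1)) ['>'] = -1
    · rw [if_pos hgt, if_pos rfl]
      have hslice1 : PySem.Chars.slice rest (some ((n + 1 : Nat) : Int)) none = rest.drop (n + 1) := by
        rw [PySem.Chars.slice_eq_listSlice, PySem.List.slice_from_natCast]
      rw [hslice0, hslice1, pipe]
      conv_lhs => rw [← hdec]
      rw [pvLoopA_zero_split _ _ hpre,
        pvLoopA_one_no_gt _ (pvFind_neg _ '>' hgt),
        ← pvProc_append, pvProc_nil_acc]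
    · obtain ⟨m, hfind2, hlen2, hdec2, hpre2⟩ := pvFind_pos (rest.drop (n + 1)) '>' hgt
      rw [if_neg hgt, hfind2]
      have hge : ¬ ((n + 1 : Nat) : Int) + (m : Int) = -1 := by omega
      rw [if_neg hge]
      have hslice2 : PySem.Chars.slice rest (some ((n + 1 : Nat) : Int))
          (some (((n + 1 : Nat) : Int) + (m : Int))) = (rest.drop (n + 1)).take m := by
        rw [PySem.Chars.slice_eq_listSlice, PySem.List.slice_natCast_add]
      rw [hslice0, hslice2, pipe]
      have hsuf : rest.drop (n + 1) = (rest.drop (n + 1)).take m ++ '>' :: (rest.drop (n + 1)).drop (m + 1) := hdec2.symm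
      conv_lhs => rw [← hdec, hsuf]
      rw [pvLoopA_zero_split _ _ hpre, pvLoopA_one_split _ _ hpre2,
        ← pvProc_append, pvProc_nil_acc]

-- ===== VERDICT (by name: the statement is the Claim_ definition above) =====
theorem extractUsingReplyTo_spec : Claim_equal_extractUsingReplyTo := by
  intro s _
  unfold Spec_extractUsingReplyTo
  simp only [extractUsingReplyTo, extractUsingReplyTo_alt]
  by_cases h : PySem.Str.find s "Reply-To: " = -1
  · rw [if_pos h, if_pos h]
  · rw [if_neg h, if_neg h]
    have h0 : 0 ≤ PySem.Str.find s "Reply-To: " := by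
      rw [PySem.Str.find_eq] at h ⊢
      have := PySem.Chars.neg_one_le_find s.toList "Reply-To: ".toList
      omega
    obtain ⟨n, hn⟩ : ∃ n : Nat, PySem.Str.find s "Reply-To: " = (n : Int) :=
      ⟨(PySem.Str.find s "Reply-To: ").toNat, by omega⟩
    rw [hn]
    have hten : ((n : Int) + 10) = ((n + 10 : Nat) : Int) := by push_cast; ring
    rw [hten, PySem.List.slice_from_natCast]
    rw [show ((n + 10 : Nat) : Int).toNat = n + 10 from by omega]
    exact congrArg some (pvMain (s.toList.drop (n + 10)))
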